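-- pv_equiv track=rewrite | github.com/Top-Figures-Business-Solution-Pty-Ltd/Smart-Accounting-SaaS-Platform | smart_accounting/scripts/update_partition_columns.py | insert_process_date_before_lodgment_due
-- ===== SOURCE A (Python) =====
-- def insert_process_date_before_lodgment_due(column_order):
--     """
--     在lodgment-due前面插入process-date
--
--     Args:
--         column_order: 现有的列顺序列表
--
--     Returns:
--         list: 更新后的列顺序
--     """
--     # 创建新的顺序列表
--     new_order = []
--     process_date_inserted = False
--
--     for column in column_order:
--         # 如果遇到lodgment-due，先插入process-date
--         if column == 'lodgment-due' and not process_date_inserted: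
--             new_order.append('process-date')
--             process_date_inserted = True
--
--         # 添加当前列（跳过已存在的process-date）
--         if column != 'process-date':
--             new_order.append(column)
--
--     # 如果没有找到lodgment-due，在末尾添加process-date
--     if not process_date_inserted:
--         # 尝试在partner后面添加
--         if 'partner' in new_order:
--             partner_index = new_order.index('partner')
--             new_order.insert(partner_index + 1, 'process-date')
--         else:
--             new_order.append('process-date')
--
--     return new_order
-- ===== SOURCE B (Python) =====
-- def insert_process_date_before_lodgment_due(column_order):
--     """Filter out 'process-date', then insert it at the position found by index search."""
--     result = [c for c in column_order if c != 'process-date']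
--     if 'lodgment-due' in result:
--         result.insert(result.index('lodgment-due'), 'process-date')
--     elif 'partner' in result:
--         result.insert(result.index('partner') + 1, 'process-date')
--     else:
--         result.append('process-date')
--     return result
-- ===== Notes on version B (the rewrite author's own statement) =====
-- stated objective: simpler
-- what changed: Replaces A's single flagged pass (inserting on the fly and patching up afterwards) by a filter phase followed by a direct index-search insertion.
import Mathlib
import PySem

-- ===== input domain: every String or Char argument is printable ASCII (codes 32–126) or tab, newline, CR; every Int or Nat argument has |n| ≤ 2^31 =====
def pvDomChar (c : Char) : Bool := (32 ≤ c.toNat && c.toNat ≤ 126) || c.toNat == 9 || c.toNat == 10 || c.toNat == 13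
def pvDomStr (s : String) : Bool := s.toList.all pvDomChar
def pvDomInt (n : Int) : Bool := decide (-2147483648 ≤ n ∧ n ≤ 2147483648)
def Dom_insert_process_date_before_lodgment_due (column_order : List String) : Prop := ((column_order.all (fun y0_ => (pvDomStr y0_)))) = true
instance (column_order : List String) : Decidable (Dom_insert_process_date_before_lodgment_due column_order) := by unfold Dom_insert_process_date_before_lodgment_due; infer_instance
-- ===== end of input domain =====

-- B replaces A's single flagged pass with a filter phase followed by a direct
-- index-search insertion (simpler decomposition, same O(n) cost).


-- ===== PORT A =====
-- one loop step of A: maybe insert 'process-date' before 'lodgment-due', then append column unless it is 'process-date'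
def pvStepA (st : List String × Bool) (column : String) : List String × Bool :=
  let st1 := if column = "lodgment-due" ∧ st.2 = false then (st.1 ++ ["process-date"], true) else st
  if column ≠ "process-date" then (st1.1 ++ [column], st1.2) else st1

def insert_process_date_before_lodgment_due (column_order : List String) : List String :=
  let r := column_order.foldl pvStepA ([], false)
  if r.2 = false then
    if "partner" ∈ r.1 then
      r.1.insertIdx (r.1.idxOf "partner" + 1) "process-date"
    else r.1 ++ ["process-date"]
  else r.1

-- ===== PORT B =====
def insert_process_date_before_lodgment_due_alt (column_order : List String) : List String :=
  let result := column_order.filter (fun c => c ≠ "process-date")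
  if "lodgment-due" ∈ result then
    result.insertIdx (result.idxOf "lodgment-due") "process-date"
  else if "partner" ∈ result then
    result.insertIdx (result.idxOf "partner" + 1) "process-date"
  else result ++ ["process-date"]

-- ===== PRECONDITION & SPEC =====
def Spec_insert_process_date_before_lodgment_due (column_order : List String) (out : List String) : Prop := out = insert_process_date_before_lodgment_due_alt column_order
instance (column_order : List String) (out : List String) : Decidable (Spec_insert_process_date_before_lodgment_due column_order out) := by unfold Spec_insert_process_date_before_lodgment_due; infer_instance

-- ===== CLAIM (what is proved, stated in full; the proofs are below) =====
def Claim_equal_insert_process_date_before_lodgment_due : Prop := ∀ (column_order : List String), Dom_insert_process_date_before_lodgment_due column_order → Spec_insert_process_date_before_lodgment_due column_order (insert_process_date_before_lodgment_due column_order)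

-- ===== LEMMAS AND PROOFS =====

-- once the flag is true, the rest of A's loop just filters out 'process-date'
theorem pvFold_true (xs : List String) (acc : List String) :
    xs.foldl pvStepA (acc, true) = (acc ++ xs.filter (fun c => c ≠ "process-date"), true) := by
  induction xs generalizing acc with
  | nil => simp
  | cons c t ih =>
    simp only [List.foldl_cons, pvStepA, List.filter_cons]
    by_cases hc : c = "process-date"
    · simp [hc, ih]
    · simp [hc, ih]

-- with the flag still false, A's loop filters and inserts before the first 'lodgment-due'
theorem pvFold_false (xs : List String) (acc : List String) :
    xs.foldl pvStepA (acc, false) =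
      if "lodgment-due" ∈ xs then
        (acc ++ (xs.filter (fun c => c ≠ "process-date")).insertIdx
            ((xs.filter (fun c => c ≠ "process-date")).idxOf "lodgment-due") "process-date", true)
      else (acc ++ xs.filter (fun c => c ≠ "process-date"), false) := by
  induction xs generalizing acc with
  | nil => simp
  | cons c t ih =>
    by_cases hl : c = "lodgment-due"
    · subst hl
      have hne : ("lodgment-due" : String) ≠ "process-date" := by decide
      simp only [List.foldl_cons, pvStepA, and_self, ne_eq, hne, not_false_eq_true, if_pos]
      rw [pvFold_true]
      simp [hne, List.insertIdx]
    · simp only [List.foldl_cons, pvStepA]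
      simp only [hl, false_and, ite_false]
      by_cases hp : c = "process-date"
      · rw [if_neg (show ¬ c ≠ "process-date" by simp [hp])]
        rw [ih]
        simp [hp]
      · simp only [ne_eq, hp, not_false_eq_true, if_pos]
        rw [ih]
        by_cases hm : "lodgment-due" ∈ t
        · simp [hm, hp, Ne.symm hl, List.insertIdx, hl]
        · simp [hm, hp, Ne.symm hl]

theorem insert_process_date_before_lodgment_due_spec' (column_order : List String) :
    insert_process_date_before_lodgment_due column_order =
      insert_process_date_before_lodgment_due_alt column_order := by
  unfold insert_process_date_before_lodgment_due insert_process_date_before_lodgment_due_alt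
  rw [pvFold_false]
  by_cases hm : "lodgment-due" ∈ column_order
  · simp [hm]
  · simp [hm]

-- ===== VERDICT (by name: the statement is the Claim_ definition above) =====
theorem insert_process_date_before_lodgment_due_spec : Claim_equal_insert_process_date_before_lodgment_due := by
  intro column_order _
  exact insert_process_date_before_lodgment_due_spec' column_order
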